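-- pv_equiv track=rewrite | github.com/v-t-9/PythonDataTypes-w3r | List/ex133.py | order_common_elements
-- ===== SOURCE A (Python) =====
-- def order_common_elements(l1,l2):
--     li = []
--     for i in l1:
--         if i in l2:
--             li.append(i)
--     for i in l2:
--         if i in l1:
--             li.append(i)
--
--     r1 = [ i for i in l1 if i in list(set(li))]
--     r2 = [ i for i in l2 if i in list(set(li))]
--     if r1 == r2:
--         return True
--     else:
--         return False
-- ===== SOURCE B (Python) =====
-- def order_common_elements(l1, l2):
--     common = set(l1) & set(l2)
--     i, j, n, m = 0, 0, len(l1), len(l2)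
--     while True:
--         while i < n and l1[i] not in common:
--             i += 1
--         while j < m and l2[j] not in common:
--             j += 1
--         if i == n and j == m:
--             return True
--         if i == n or j == m:
--             return False
--         if l1[i] != l2[j]:
--             return False
--         i += 1
--         j += 1
-- ===== Notes on version B (the rewrite author's own statement) =====
-- stated objective: faster
-- what changed: Instead of materialising the common-element list (with quadratic membership scans) and two filtered lists and comparing them, B computes the common set once with set intersection and walks both lists in lockstep with two pointers, returning at the first mismatch.
import Mathlib
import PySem

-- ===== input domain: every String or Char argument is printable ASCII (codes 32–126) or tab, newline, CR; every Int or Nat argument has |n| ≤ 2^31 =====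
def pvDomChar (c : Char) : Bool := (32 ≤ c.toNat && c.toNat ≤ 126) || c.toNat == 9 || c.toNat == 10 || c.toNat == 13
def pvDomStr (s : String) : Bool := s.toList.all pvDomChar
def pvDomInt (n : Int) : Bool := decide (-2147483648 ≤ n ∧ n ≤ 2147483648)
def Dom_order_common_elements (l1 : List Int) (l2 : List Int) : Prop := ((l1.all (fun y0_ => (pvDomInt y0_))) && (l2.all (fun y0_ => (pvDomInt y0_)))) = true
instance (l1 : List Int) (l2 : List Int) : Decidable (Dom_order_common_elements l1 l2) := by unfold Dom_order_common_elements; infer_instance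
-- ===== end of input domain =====

-- B replaces A's quadratic build-two-filtered-lists-and-compare with a single
-- two-pointer lockstep walk over the common elements (common set computed once).
-- ===== PORT A =====
def order_common_elements (l1 : List Int) (l2 : List Int) : Bool :=
  -- li = []; for i in l1: if i in l2: li.append(i); for i in l2: if i in l1: li.append(i)
  let li := l1.foldl (fun acc i => if l2.contains i then acc ++ [i] else acc) []
  let li := l2.foldl (fun acc i => if l1.contains i then acc ++ [i] else acc) li
  -- r1/r2: comprehensions filtering by membership in list(set(li)) (membership only, order irrelevant)
  let s := PySem.Set.ofList li
  let r1 := l1.filter (fun i => PySem.Set.contains s i)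
  let r2 := l2.filter (fun i => PySem.Set.contains s i)
  if r1 == r2 then true else false

-- ===== PORT B =====
-- inner 'while i < n and l1[i] not in common: i += 1' = skip the non-common prefix
def ocSkip (c : Int → Bool) (xs : List Int) : List Int := xs.dropWhile (fun x => !c x)

-- the outer 'while True' loop of B, on the suffixes still to be examined
def ocGo (c : Int → Bool) (xs ys : List Int) : Bool :=
  match hx : ocSkip c xs, ocSkip c ys with
  | [], [] => true
  | [], _ :: _ => false
  | _ :: _, [] => false
  | a :: as, b :: bs => if a != b then false else ocGo c as bs
termination_by xs.length
decreasing_by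
  have h := List.length_dropWhile_le (p := fun x => !c x) (l := xs)
  simp only [ocSkip] at hx
  rw [hx] at h
  simpa using Nat.lt_of_lt_of_le (Nat.lt_succ_self as.length) h

def order_common_elements_alt (l1 : List Int) (l2 : List Int) : Bool :=
  let common := PySem.Set.inter (PySem.Set.ofList l1) l2
  ocGo (fun x => PySem.Set.contains common x) l1 l2

-- ===== PRECONDITION & SPEC =====
def Spec_order_common_elements (l1 : List Int) (l2 : List Int) (out : Bool) : Prop := out = order_common_elements_alt l1 l2
instance (l1 : List Int) (l2 : List Int) (out : Bool) : Decidable (Spec_order_common_elements l1 l2 out) := by unfold Spec_order_common_elements; infer_instance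

-- ===== CLAIM (what is proved, stated in full; the proofs are below) =====
def Claim_equal_order_common_elements : Prop := ∀ (l1 : List Int) (l2 : List Int), Dom_order_common_elements l1 l2 → Spec_order_common_elements l1 l2 (order_common_elements l1 l2)

-- ===== LEMMAS AND PROOFS =====

-- ===== VERDICT (by name: the statement is the Claim_ definition above) =====
-- filtering ignores the skipped non-common prefix
lemma filter_dropWhile (c : Int → Bool) (xs : List Int) :
    (xs.dropWhile (fun x => !c x)).filter c = xs.filter c := by
  induction xs with
  | nil => rfl
  | cons a as ih =>
    by_cases h : c a = true
    · simp [List.dropWhile, List.filter, h]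
    · simp only [Bool.not_eq_true] at h
      simp [List.dropWhile, List.filter, h, ih]

-- the head surviving the skip is a common element
lemma dropWhile_head_c (c : Int → Bool) : ∀ (l : List Int) (a : Int) (as : List Int),
    l.dropWhile (fun x => !c x) = a :: as → c a = true := by
  intro l
  induction l with
  | nil => intro a as h; simp [List.dropWhile] at h
  | cons x xs ih =>
    intro a as h
    cases hcx : c x with
    | true =>
      rw [List.dropWhile_cons] at h
      simp [hcx] at h
      rw [← h.1]; exact hcx
    | false =>
      rw [List.dropWhile_cons] at h
      simp [hcx] at h
      exact ih a as h

-- the lockstep walk decides equality of the two filtered sublists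
lemma ocGo_eq_filter (c : Int → Bool) (xs ys : List Int) :
    ocGo c xs ys = (xs.filter c == ys.filter c) := by
  induction xs, ys using ocGo.induct c with
  | case1 xs ys hx hy =>
      rw [ocGo]; rw [hx, hy]
      rw [← filter_dropWhile c xs, ← filter_dropWhile c ys]
      simp only [ocSkip] at hx hy
      rw [hx, hy]; rfl
  | case2 xs ys b bs hx hy =>
      rw [ocGo]; rw [hx, hy]
      have hb : c b = true := dropWhile_head_c c ys b bs (by simpa [ocSkip] using hy)
      rw [← filter_dropWhile c xs, ← filter_dropWhile c ys]
      simp only [ocSkip] at hx hy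
      rw [hx, hy]
      simp [List.filter, hb]
  | case3 xs ys a as hx hy =>
      rw [ocGo]; rw [hx, hy]
      have ha : c a = true := dropWhile_head_c c xs a as (by simpa [ocSkip] using hx)
      rw [← filter_dropWhile c xs, ← filter_dropWhile c ys]
      simp only [ocSkip] at hx hy
      rw [hx, hy]
      simp [List.filter, ha]
  | case4 xs ys a as b bs hx hy hab =>
      rw [ocGo]; rw [hx, hy]
      have ha : c a = true := dropWhile_head_c c xs a as (by simpa [ocSkip] using hx)
      have hb : c b = true := dropWhile_head_c c ys b bs (by simpa [ocSkip] using hy)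
      rw [← filter_dropWhile c xs, ← filter_dropWhile c ys]
      simp only [ocSkip] at hx hy
      rw [hx, hy]
      simp only [bne_iff_ne, ne_eq] at hab
      simp [List.filter, ha, hb, hab]
  | case5 xs ys a as b bs hx hy hab ih =>
      rw [ocGo]; rw [hx, hy]
      have ha : c a = true := dropWhile_head_c c xs a as (by simpa [ocSkip] using hx)
      have hb : c b = true := dropWhile_head_c c ys b bs (by simpa [ocSkip] using hy)
      rw [← filter_dropWhile c xs, ← filter_dropWhile c ys]
      simp only [ocSkip] at hx hy
      rw [hx, hy]
      simp only [bne_iff_ne, ne_eq, not_not] at hab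
      subst hab
      simp [List.filter, ha, ih]

-- membership in A's accumulated li list
lemma mem_li (l1 l2 : List Int) (x : Int) :
    x ∈ (l2.foldl (fun acc i => if l1.contains i then acc ++ [i] else acc)
          (l1.foldl (fun acc i => if l2.contains i then acc ++ [i] else acc) [])) ↔
    x ∈ l1 ∧ x ∈ l2 := by
  have key : ∀ (p : Int → Bool) (l acc : List Int),
      x ∈ l.foldl (fun acc i => if p i then acc ++ [i] else acc) acc ↔
      x ∈ acc ∨ (x ∈ l ∧ p x = true) := by
    intro p l
    induction l with
    | nil => simp
    | cons a as ih =>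
      intro acc
      simp only [List.foldl_cons]
      by_cases hp : p a = true
      · rw [if_pos hp, ih]
        constructor
        · rintro (h | h)
          · rcases List.mem_append.mp h with h | h
            · exact Or.inl h
            · simp at h; subst h; exact Or.inr ⟨List.mem_cons_self, hp⟩
          · exact Or.inr ⟨List.mem_cons_of_mem _ h.1, h.2⟩
        · rintro (h | ⟨h1, h2⟩)
          · exact Or.inl (List.mem_append.mpr (Or.inl h))
          · rcases List.mem_cons.mp h1 with h | h
            · subst h; exact Or.inl (by simp)
            · exact Or.inr ⟨h, h2⟩
      · rw [if_neg hp, ih]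
        constructor
        · rintro (h | h)
          · exact Or.inl h
          · exact Or.inr ⟨List.mem_cons_of_mem _ h.1, h.2⟩
        · rintro (h | ⟨h1, h2⟩)
          · exact Or.inl h
          · rcases List.mem_cons.mp h1 with h | h
            · subst h; exact absurd h2 (by simpa using hp)
            · exact Or.inr ⟨h, h2⟩
  rw [key, key]
  simp only [List.mem_nil_iff, false_or, List.contains_iff_mem]
  constructor
  · rintro (⟨h1, h2⟩ | ⟨h2, h1⟩) <;> exact ⟨by assumption, by assumption⟩
  · rintro ⟨h1, h2⟩; exact Or.inr ⟨h2, h1⟩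

lemma ite_bool_id (b : Bool) : (if b = true then true else false) = b := by
  cases b <;> rfl

theorem order_common_elements_spec : Claim_equal_order_common_elements := by
  unfold Claim_equal_order_common_elements
  intro l1 l2 _
  unfold Spec_order_common_elements order_common_elements order_common_elements_alt
  simp only []
  rw [ocGo_eq_filter]
  have hc : ∀ x : Int,
      (PySem.Set.contains (PySem.Set.inter (PySem.Set.ofList l1) l2) x) =
      (PySem.Set.contains (PySem.Set.ofList
        (l2.foldl (fun acc i => if l1.contains i then acc ++ [i] else acc)
          (l1.foldl (fun acc i => if l2.contains i then acc ++ [i] else acc) []))) x) := by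
    intro x
    rw [Bool.eq_iff_iff, PySem.Set.contains_iff, PySem.Set.contains_iff,
        PySem.Set.mem_inter, PySem.Set.mem_ofList, PySem.Set.mem_ofList, mem_li]
  have e1 : l1.filter (fun x => PySem.Set.contains (PySem.Set.inter (PySem.Set.ofList l1) l2) x)
      = l1.filter (fun i => PySem.Set.contains (PySem.Set.ofList
        (l2.foldl (fun acc i => if l1.contains i then acc ++ [i] else acc)
          (l1.foldl (fun acc i => if l2.contains i then acc ++ [i] else acc) []))) i) := by
    apply List.filter_congr; intro x _; exact hc x
  have e2 : l2.filter (fun x => PySem.Set.contains (PySem.Set.inter (PySem.Set.ofList l1) l2) x)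
      = l2.filter (fun i => PySem.Set.contains (PySem.Set.ofList
        (l2.foldl (fun acc i => if l1.contains i then acc ++ [i] else acc)
          (l1.foldl (fun acc i => if l2.contains i then acc ++ [i] else acc) []))) i) := by
    apply List.filter_congr; intro x _; exact hc x
  rw [e1, e2]
  exact ite_bool_id _
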